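-- pv_equiv track=rewrite | github.com/blendnet-ai/skylearn-django-lms | practice/providers/providers.py | generate_fluency_summary
-- ===== SOURCE A (Python) =====
-- def generate_fluency_summary(fluency_score):
--     score_details = {
--         "segments": [
--             {
--                 "description": "Good",
--                 "fluency_score_range": [85, 100],
--                 "details": "Impressive fluency! Your ability to express yourself with ease is remarkable. You come across as a confident and fluent speaker."
--             },
--             {
--                 "description": "Average",
--                 "fluency_score_range": [60, 85],
--                 "details": "Your fluency is decent, but there's room for improvement. Work on reducing hesitations and improving the overall flow of your speech."
--             },
--             {
--                 "description": "Bad",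
--                 "fluency_score_range": [0, 60],
--                 "details": "Your fluency needs significant improvement. Hesitations and disruptions in your speech make it challenging to follow. Practice speaking more confidently and working on transitions between ideas. "
--             },
--     ]
--     }
--
--     segments = score_details["segments"]
--
--     for segment in segments:
--         score_range = segment["fluency_score_range"]
--         if score_range[0] <= fluency_score < score_range[1]:
--             return segment["description"], segment["details"]
--
--     return "Unknown", "Fluency score outside the specified range."
-- ===== SOURCE B (Python) =====
-- GOOD_TXT = "Impressive fluency! Your ability to express yourself with ease is remarkable. You come across as a confident and fluent speaker."
-- AVG_TXT = "Your fluency is decent, but there's room for improvement. Work on reducing hesitations and improving the overall flow of your speech."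
-- BAD_TXT = "Your fluency needs significant improvement. Hesitations and disruptions in your speech make it challenging to follow. Practice speaking more confidently and working on transitions between ideas. "
--
-- CATEGORIES = (("Bad", BAD_TXT), ("Average", AVG_TXT), ("Good", GOOD_TXT))
--
--
-- def generate_fluency_summary(fluency_score):
--     if not (0 <= fluency_score < 100):
--         return "Unknown", "Fluency score outside the specified range."
--     # index = number of category thresholds the score has passed
--     idx = (fluency_score >= 60) + (fluency_score >= 85)
--     return CATEGORIES[idx]
-- ===== Notes on version B (the rewrite author's own statement) =====
-- stated objective: alternative
-- what changed: Replaced the segment table and its first-match range-scanning loop with a single bounds check plus an arithmetic index (count of thresholds passed) into a category tuple; no per-segment range comparisons.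
import Mathlib
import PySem

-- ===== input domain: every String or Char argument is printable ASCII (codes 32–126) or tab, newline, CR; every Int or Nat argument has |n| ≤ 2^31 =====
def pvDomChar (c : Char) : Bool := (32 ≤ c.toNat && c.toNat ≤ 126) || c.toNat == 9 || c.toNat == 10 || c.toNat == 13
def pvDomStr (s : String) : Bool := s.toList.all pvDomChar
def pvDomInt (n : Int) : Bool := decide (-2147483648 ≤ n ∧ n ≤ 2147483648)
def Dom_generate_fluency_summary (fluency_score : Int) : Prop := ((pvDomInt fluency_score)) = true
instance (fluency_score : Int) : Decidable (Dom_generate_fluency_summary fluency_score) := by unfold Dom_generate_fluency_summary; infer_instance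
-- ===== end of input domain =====

-- B: one bounds check + arithmetic index into a category table (vs A's per-segment range scan); same values everywhere.

-- ===== PORT A =====
-- a segment: (description, fluency_score_range as a two-element list, details)
def pvSegments : List (String × List Int × String) :=
  [ ("Good", [85, 100],
     "Impressive fluency! Your ability to express yourself with ease is remarkable. You come across as a confident and fluent speaker."),
    ("Average", [60, 85],
     "Your fluency is decent, but there's room for improvement. Work on reducing hesitations and improving the overall flow of your speech."),
    ("Bad", [0, 60],
     "Your fluency needs significant improvement. Hesitations and disruptions in your speech make it challenging to follow. Practice speaking more confidently and working on transitions between ideas. ") ]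

-- the for-loop with early return: first segment whose range contains the score
def pvScan (fluency_score : Int) : List (String × List Int × String) → String × String
  | [] => ("Unknown", "Fluency score outside the specified range.")
  | seg :: rest =>
      let score_range := seg.2.1
      if (PySem.List.pyGetD score_range 0 0) ≤ fluency_score ∧ fluency_score < (PySem.List.pyGetD score_range 1 0) then
        (seg.1, seg.2.2)
      else pvScan fluency_score rest

def generate_fluency_summary (fluency_score : Int) : String × String :=
  pvScan fluency_score pvSegments

-- ===== PORT B =====
def pvCategories : List (String × String) :=
  [ ("Bad",
     "Your fluency needs significant improvement. Hesitations and disruptions in your speech make it challenging to follow. Practice speaking more confidently and working on transitions between ideas. "),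
    ("Average",
     "Your fluency is decent, but there's room for improvement. Work on reducing hesitations and improving the overall flow of your speech."),
    ("Good",
     "Impressive fluency! Your ability to express yourself with ease is remarkable. You come across as a confident and fluent speaker.") ]

def generate_fluency_summary_alt (fluency_score : Int) : String × String :=
  if ¬ (0 ≤ fluency_score ∧ fluency_score < 100) then
    ("Unknown", "Fluency score outside the specified range.")
  else
    -- index = number of category thresholds the score has passed
    let idx : Int := (if 60 ≤ fluency_score then 1 else 0) + (if 85 ≤ fluency_score then 1 else 0)
    (PySem.List.pyGetD pvCategories idx ("", ""))

-- ===== PRECONDITION & SPEC =====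
def Spec_generate_fluency_summary (fluency_score : Int) (out : String × String) : Prop := out = generate_fluency_summary_alt fluency_score
instance (fluency_score : Int) (out : String × String) : Decidable (Spec_generate_fluency_summary fluency_score out) := by unfold Spec_generate_fluency_summary; infer_instance

-- ===== CLAIM (what is proved, stated in full; the proofs are below) =====
def Claim_equal_generate_fluency_summary : Prop := ∀ (fluency_score : Int), Dom_generate_fluency_summary fluency_score → Spec_generate_fluency_summary fluency_score (generate_fluency_summary fluency_score)

-- ===== LEMMAS AND PROOFS =====

-- ===== VERDICT (by name: the statement is the Claim_ definition above) =====
theorem generate_fluency_summary_spec : Claim_equal_generate_fluency_summary := by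
  intro n _
  unfold Spec_generate_fluency_summary
  simp only [generate_fluency_summary, generate_fluency_summary_alt]
  by_cases h1 : 60 ≤ n <;> by_cases h2 : 85 ≤ n <;> by_cases h0 : 0 ≤ n <;>
    by_cases h4 : n < 100 <;> by_cases h5 : n < 85 <;> by_cases h6 : n < 60 <;>
    first
      | omega
      | simp [pvScan, pvSegments, pvCategories, h1, h2, h0, h4, h5, h6,
          PySem.List.pyGetD, PySem.List.pyGet?, PySem.List.pyIdx?]
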